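-- pv_equiv track=rewrite | github.com/ThePJB/python-crashcourse | solutions.py | delete_second_word
-- ===== SOURCE A (Python) =====
-- def delete_second_word(s):
--     acc = ""
--     ss = s.split()
--     acc += ss[0]
--     for x in ss[2:]:
--         acc += ' '
--         acc += x
--     return acc
-- ===== SOURCE B (Python) =====
-- def delete_second_word(s):
--     # One pass over the characters: count word starts and emit every word
--     # except the second directly, never building the word list.
--     out = []
--     count = 0
--     in_word = False
--     for ch in s:
--         if ch.isspace():
--             in_word = False
--         else:
--             if not in_word:
--                 count += 1
--                 in_word = True
--                 if count != 2 and out: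
--                     out.append(' ')
--             if count != 2:
--                 out.append(ch)
--     return ''.join(out)
-- ===== Notes on version B (the rewrite author's own statement) =====
-- stated objective: alternative
-- what changed: Replaces A's split-then-concatenate (build the word list, index it, loop over a slice) with a single character-level state-machine pass that counts word starts and emits every word except the second directly, never materialising the word list.
import Mathlib
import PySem

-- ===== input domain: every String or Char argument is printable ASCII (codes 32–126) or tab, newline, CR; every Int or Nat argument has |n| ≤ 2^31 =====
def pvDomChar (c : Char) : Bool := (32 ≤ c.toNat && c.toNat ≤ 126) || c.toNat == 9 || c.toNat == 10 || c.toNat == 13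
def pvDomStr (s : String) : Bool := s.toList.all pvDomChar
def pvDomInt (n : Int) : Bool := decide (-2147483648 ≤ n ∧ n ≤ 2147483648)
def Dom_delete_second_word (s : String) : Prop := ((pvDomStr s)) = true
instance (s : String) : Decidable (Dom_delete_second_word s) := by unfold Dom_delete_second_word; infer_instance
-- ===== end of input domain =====

-- B replaces A's split/index/slice word-list pipeline with a single character-level state-machine pass (objective: alternative).


-- ===== PORT A =====
def delete_second_word (s : String) : String :=
  let acc : String := ""
  let ss := PySem.Str.split₀ s
  let acc := acc ++ ((PySem.List.pyGet? ss (0 : Int)).getD "")   -- ss[0]; IndexError (none) excluded by Pre_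
  (PySem.List.slice ss (some 2) none).foldl (fun acc x => acc ++ " " ++ x) acc

-- ===== PORT B =====
-- the body of B's for-loop over the characters (state: output chars, word counter, in_word flag)
def pvStepB (st : List Char × Int × Bool) (ch : Char) : List Char × Int × Bool :=
  let out := st.1
  let count := st.2.1
  let inWord := st.2.2
  if PySem.Chars.isspace ch then (out, count, false)
  else if inWord then
    ((if count ≠ 2 then out ++ [ch] else out), count, true)
  else
    let count := count + 1
    let out := if count ≠ 2 ∧ out ≠ [] then out ++ [' '] else out
    ((if count ≠ 2 then out ++ [ch] else out), count, true)

def delete_second_word_alt (s : String) : String :=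
  let fin := s.toList.foldl pvStepB ([], 0, false)
  String.ofList fin.1

-- ===== PRECONDITION & SPEC =====
-- Pre_ excludes exactly the inputs with no words (empty / all-whitespace), where A raises IndexError on ss[0].
def Pre_delete_second_word (s : String) : Prop := PySem.Str.split₀ s ≠ []
instance (s : String) : Decidable (Pre_delete_second_word s) := by unfold Pre_delete_second_word; infer_instance
def pvWitness_delete_second_word : String := "hello there world"

def Spec_delete_second_word (s : String) (out : String) : Prop := out = delete_second_word_alt s
instance (s : String) (out : String) : Decidable (Spec_delete_second_word s out) := by unfold Spec_delete_second_word; infer_instance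

-- ===== CLAIM (what is proved, stated in full; the proofs are below) =====
def Claim_equal_delete_second_word : Prop := ∀ (s : String), Dom_delete_second_word s → Pre_delete_second_word s → Spec_delete_second_word s (delete_second_word s)

-- ===== LEMMAS AND PROOFS =====

-- the word list accumulated so far (completed words plus the partial current word)
def pvPartial (cur : List Char) (acc : List (List Char)) : List (List Char) :=
  acc.reverse ++ (if cur.isEmpty then [] else [cur.reverse])

-- the output B maintains: the words joined by ' ' with the second word dropped
def pvRender : List (List Char) → List Char
  | [] => []
  | w :: rest => PySem.Chars.join [' '] (w :: rest.drop 1)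

theorem pv_join_ne_nil (a : List Char) (t : List (List Char)) (ha : a ≠ []) :
    PySem.Chars.join [' '] (a :: t) ≠ [] := by
  cases t with
  | nil => simpa [PySem.Chars.join_singleton] using ha
  | cons b t' => rw [PySem.Chars.join_cons_cons]; simp [ha]

theorem pv_join_snoc (t : List (List Char)) : ∀ (a w : List Char),
    PySem.Chars.join [' '] (a :: (t ++ [w]))
      = PySem.Chars.join [' '] (a :: t) ++ [' '] ++ w := by
  induction t with
  | nil => intro a w; simp [PySem.Chars.join_cons_cons, PySem.Chars.join_singleton]
  | cons b t' ih =>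
    intro a w
    have h1 : a :: ((b :: t') ++ [w]) = a :: b :: (t' ++ [w]) := by simp
    rw [h1, PySem.Chars.join_cons_cons, ih b w, PySem.Chars.join_cons_cons]
    simp

-- starting a fresh word: what pvRender does when a new nonempty word is appended
theorem pv_render_snoc_new (ws : List (List Char)) (w : List Char)
    (hws : ∀ v ∈ ws, v ≠ []) :
    pvRender (ws ++ [w]) =
      if ws = [] then w
      else if ws.length = 1 then pvRender ws
      else pvRender ws ++ [' '] ++ w := by
  match ws with
  | [] => simp [pvRender, PySem.Chars.join_singleton]
  | [a] => simp [pvRender, PySem.Chars.join_singleton]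
  | a :: b :: t =>
    have h1 : pvRender ((a :: b :: t) ++ [w]) = PySem.Chars.join [' '] (a :: (t ++ [w])) := by
      simp [pvRender]
    rw [h1, pv_join_snoc]
    simp [pvRender]

-- extending the current last word by one character
theorem pv_render_snoc_ext (ws : List (List Char)) (w : List Char) (c : Char)
    (h : ws.length ≠ 1) :
    pvRender (ws ++ [w ++ [c]]) = pvRender (ws ++ [w]) ++ [c] := by
  match ws with
  | [] => simp [pvRender, PySem.Chars.join_singleton]
  | [a] => exact absurd rfl h
  | a :: b :: t =>
    have e1 : pvRender ((a :: b :: t) ++ [w ++ [c]])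
        = PySem.Chars.join [' '] (a :: (t ++ [w ++ [c]])) := by simp [pvRender]
    have e2 : pvRender ((a :: b :: t) ++ [w])
        = PySem.Chars.join [' '] (a :: (t ++ [w])) := by simp [pvRender]
    rw [e1, e2, pv_join_snoc t a (w ++ [c]), pv_join_snoc t a w]
    simp

-- pvRender of a nonempty word list with nonempty first word is nonempty
theorem pv_render_ne_nil (ws : List (List Char)) (h : ws ≠ []) (hws : ∀ v ∈ ws, v ≠ []) :
    pvRender ws ≠ [] := by
  match ws with
  | [] => exact absurd rfl h
  | a :: t => exact pv_join_ne_nil a (t.drop 1) (hws a (by simp))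

-- THE LOOP INVARIANT: B's fold, started from the render of the words seen so far,
-- computes the render of split₀.go's final word list.
theorem pv_inv : ∀ (cs cur : List Char) (acc : List (List Char)),
    (∀ w ∈ acc, w ≠ []) →
    (cs.foldl pvStepB
        (pvRender (pvPartial cur acc), ((pvPartial cur acc).length : Int), !cur.isEmpty)).1
      = pvRender (PySem.Chars.split₀.go cs cur acc) := by
  intro cs
  induction cs with
  | nil =>
    intro cur acc _
    cases cur with
    | nil => simp [PySem.Chars.split₀.go, pvPartial]
    | cons d cur' => simp [PySem.Chars.split₀.go, pvPartial]
  | cons c rest ih =>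
    intro cur acc hacc
    rw [List.foldl_cons]
    by_cases hsp : PySem.Chars.isspace c = true
    · -- whitespace: close the current word (if any); the rendered output is unchanged
      cases cur with
      | nil =>
        have hstep : pvStepB (pvRender (pvPartial [] acc), ((pvPartial [] acc).length : Int),
            !(List.isEmpty ([] : List Char))) c
            = (pvRender (pvPartial [] acc), ((pvPartial [] acc).length : Int), !(List.isEmpty ([] : List Char))) := by
          simp [pvStepB, hsp]
        rw [hstep, ih [] acc hacc]
        simp [PySem.Chars.split₀.go, hsp]
      | cons d cur' =>
        have hpar : pvPartial [] ((cur'.reverse ++ [d]) :: acc) = pvPartial (d :: cur') acc := by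
          simp [pvPartial]
        have hstep : pvStepB (pvRender (pvPartial (d :: cur') acc),
            ((pvPartial (d :: cur') acc).length : Int), !(List.isEmpty (d :: cur'))) c
            = (pvRender (pvPartial [] (List.reverse (d :: cur') :: acc)),
               ((pvPartial [] (List.reverse (d :: cur') :: acc)).length : Int), !(List.isEmpty ([] : List Char))) := by
          simp [pvStepB, hsp, hpar]
        rw [hstep, ih [] _ (by
          intro w hw
          simp only [List.mem_cons] at hw
          rcases hw with h | h
          · subst h; simp
          · exact hacc w h)]
        simp [PySem.Chars.split₀.go, hsp]
    · -- non-whitespace character c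
      have hsp' : PySem.Chars.isspace c = false := by simpa using hsp
      cases cur with
      | nil =>
        -- a new word starts
        have hpar0 : pvPartial [] acc = acc.reverse := by simp [pvPartial]
        have hparn : pvPartial [c] acc = acc.reverse ++ [[c]] := by simp [pvPartial]
        have hlen : ((pvPartial [c] acc).length : Int) = ((pvPartial [] acc).length : Int) + 1 := by
          rw [hpar0, hparn]; simp
        have hout : (pvStepB (pvRender (pvPartial [] acc), ((pvPartial [] acc).length : Int),
              !(List.isEmpty ([] : List Char))) c)
            = (pvRender (pvPartial [c] acc), ((pvPartial [c] acc).length : Int),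
               !(List.isEmpty [c])) := by
          have hrender : pvRender (acc.reverse ++ [[c]]) =
              (if ((acc.reverse.length : Int) + 1 ≠ 2 ∧ pvRender acc.reverse ≠ [])
               then pvRender acc.reverse ++ [' '] else pvRender acc.reverse)
              ++ (if ((acc.reverse.length : Int) + 1 ≠ 2) then [c] else []) := by
            have haccrev : ∀ v ∈ acc.reverse, v ≠ [] := by
              intro v hv; exact hacc v (List.mem_reverse.mp hv)
            rw [pv_render_snoc_new acc.reverse [c] haccrev]
            rcases hn : acc.reverse with _ | ⟨a, t⟩
            · simp [pvRender]
            · rcases ht : t with _ | ⟨b, t'⟩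
              · subst ht; simp [pvRender, PySem.Chars.join_singleton]
              · subst ht
                have hne : pvRender (a :: b :: t') ≠ [] :=
                  pv_render_ne_nil _ (by simp) (by rw [← hn]; intro v hv; exact hacc v (List.mem_reverse.mp hv))
                have hf : ¬((t'.length : Int) + 1 + 1 + 1 = 2) := by omega
                simp [hf, hne, List.append_assoc]
          simp only [pvStepB, hsp', hpar0, hparn]
          cases hif : decide (((acc.reverse.length : Int) + 1 ≠ 2)) <;>
            simp_all
        rw [hout, ih [c] acc hacc]
        simp [PySem.Chars.split₀.go, hsp']
      | cons d cur' =>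
        -- extend the current word
        have hpar1 : pvPartial (d :: cur') acc = acc.reverse ++ [(d :: cur').reverse] := by
          simp [pvPartial]
        have hpar2 : pvPartial (c :: d :: cur') acc
            = acc.reverse ++ [(d :: cur').reverse ++ [c]] := by simp [pvPartial]
        have hlen : ((pvPartial (c :: d :: cur') acc).length : Int)
            = ((pvPartial (d :: cur') acc).length : Int) := by rw [hpar1, hpar2]; simp
        have hout : (pvStepB (pvRender (pvPartial (d :: cur') acc),
              ((pvPartial (d :: cur') acc).length : Int), !(List.isEmpty (d :: cur'))) c)
            = (pvRender (pvPartial (c :: d :: cur') acc),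
               ((pvPartial (c :: d :: cur') acc).length : Int), !(List.isEmpty (c :: d :: cur'))) := by
          have hcnt : ((pvPartial (d :: cur') acc).length : Int) = (acc.length : Int) + 1 := by
            rw [hpar1]; simp
          by_cases h2 : (acc.length : Int) + 1 = 2
          · -- current word is the second word: it is dropped, output unchanged
            have hlacc : acc.reverse.length = 1 := by simp; omega
            have hr : pvRender (pvPartial (c :: d :: cur') acc)
                = pvRender (pvPartial (d :: cur') acc) := by
              rw [hpar1, hpar2]
              rcases hx : acc.reverse with _ | ⟨a, t⟩
              · rw [hx] at hlacc; simp at hlacc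
              · rcases t with _ | ⟨b, t'⟩
                · simp [pvRender, PySem.Chars.join_singleton]
                · rw [hx] at hlacc; simp at hlacc
            simp only [pvStepB, hsp', hcnt, hlen, hr]
            simp [h2]
          · have hr : pvRender (pvPartial (c :: d :: cur') acc)
                = pvRender (pvPartial (d :: cur') acc) ++ [c] := by
              rw [hpar1, hpar2]
              exact pv_render_snoc_ext acc.reverse _ c (by simp; omega)
            simp only [pvStepB, hsp', hcnt, hlen, hr]
            simp [h2]
        rw [hout, ih (c :: d :: cur') acc hacc]
        simp [PySem.Chars.split₀.go, hsp']

-- B's result is always the render of the split word list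
theorem pv_alt_toList (s : String) :
    (delete_second_word_alt s).toList = pvRender (PySem.Chars.split₀ s.toList) := by
  unfold delete_second_word_alt PySem.Chars.split₀
  have h := pv_inv s.toList [] [] (by intro w hw; simp at hw)
  have e : ((pvRender (pvPartial [] []), ((pvPartial [] []).length : Int),
      !(List.isEmpty ([] : List Char))))
      = (([] : List Char), (0 : Int), false) := by
    simp [pvPartial, pvRender]
  rw [e] at h
  simpa using h

-- A's loop, run from any seed a, computes ' '-join of (a :: remaining words): char-list level.
theorem pv_chars_foldl_join (t : List (List Char)) : ∀ (a : List Char),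
    t.foldl (fun acc x => acc ++ [' '] ++ x) a = PySem.Chars.join [' '] (a :: t) := by
  induction t with
  | nil => intro a; simp [PySem.Chars.join_singleton]
  | cons x t ih =>
    intro a
    rw [List.foldl_cons, ih, PySem.Chars.join_cons_cons]
    cases t with
    | nil => simp [PySem.Chars.join_singleton]
    | cons y t' => rw [PySem.Chars.join_cons_cons, PySem.Chars.join_cons_cons]; simp

-- bridge the String-level foldl of A to the char-list level
theorem pv_str_foldl_toList (t : List String) : ∀ (a : String),
    (t.foldl (fun acc x => acc ++ " " ++ x) a).toList
      = (t.map String.toList).foldl (fun acc x => acc ++ [' '] ++ x) a.toList := by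
  induction t with
  | nil => intro a; rfl
  | cons x t ih => intro a; rw [List.foldl_cons, ih]; simp

-- ===== VERDICT (by name: the statements are the Claim_ definitions above) =====
theorem delete_second_word_spec : Claim_equal_delete_second_word := by
  intro s _ hpre
  unfold Spec_delete_second_word
  apply String.ext
  rw [pv_alt_toList]
  obtain ⟨w, rest, hws⟩ : ∃ w rest, PySem.Chars.split₀ s.toList = w :: rest := by
    cases h : PySem.Chars.split₀ s.toList with
    | nil =>
      exact absurd (by simp [PySem.Str.split₀, h]) hpre
    | cons w rest => exact ⟨w, rest, rfl⟩
  unfold delete_second_word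
  simp only [PySem.Str.split₀, hws]
  rw [pv_str_foldl_toList]
  have hget : (PySem.List.pyGet? ((w :: rest).map String.ofList) (0 : Int)).getD "" =
      String.ofList w := by
    simp [PySem.List.pyGet?, PySem.List.pyIdx?]
  have hslice : PySem.List.slice ((w :: rest).map String.ofList) (some 2) none
      = (rest.drop 1).map String.ofList := by
    simp [PySem.List.slice_from]
  rw [hget, hslice]
  have hmaps : ((rest.drop 1).map String.ofList).map String.toList = rest.drop 1 := by
    simp [List.map_map, Function.comp_def]
  rw [hmaps, pv_chars_foldl_join]
  simp [pvRender]
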